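-- pv_equiv track=rewrite | github.com/jak010/tpjt-tradingview-scrapper | websocketlib/utils.py | cut_of_range_by_number
-- ===== SOURCE A (Python) =====
-- from typing import List, NoReturn, Optional
--
-- def cut_of_range_by_number(symbol_names: List[str], max_worker):
--     # MAX CORE 만큼 인덱싱 처리하기
--
--     count = 0
--     remainder = len(symbol_names) // max_worker
--     divider = len(symbol_names) % max_worker
--
--     index_range = []
--     for idx, value in enumerate(symbol_names, start=1):
--         if idx % max_worker == 0:
--             start_index = count * max_worker
--             end_index = idx
--             index_range.append((start_index, end_index))
--             count += 1
--
--             if count == remainder: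
--                 start_index = count * max_worker
--                 end_index = start_index + divider
--
--                 index_range.append((start_index, end_index))
--     return index_range
-- ===== SOURCE B (Python) =====
-- def cut_of_range_by_number(symbol_names, max_worker):
--     # closed form over chunk boundaries: O(n/max_worker) instead of O(n)
--     full, tail = divmod(len(symbol_names), max_worker)
--     index_range = [(i * max_worker, (i + 1) * max_worker) for i in range(full)]
--     if full > 0:
--         index_range.append((full * max_worker, full * max_worker + tail))
--     return index_range
-- ===== Notes on version B (the rewrite author's own statement) =====
-- stated objective: faster
-- what changed: B computes the chunk boundaries arithmetically from divmod(len, max_worker) and iterates only over the n//max_worker chunk starts, instead of scanning every element and testing idx % max_worker inside the loop.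
-- outside the precondition, e.g. on cut_of_range_by_number(['a', 'a', 'a', 'a'], -2): A returns [(0, 2), (-2, 4)], B returns []; on cut_of_range_by_number(['a'], -3): A returns [], B returns []; on cut_of_range_by_number(['a'], 0): A raises ZeroDivisionError, B raises ZeroDivisionError
import Mathlib
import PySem

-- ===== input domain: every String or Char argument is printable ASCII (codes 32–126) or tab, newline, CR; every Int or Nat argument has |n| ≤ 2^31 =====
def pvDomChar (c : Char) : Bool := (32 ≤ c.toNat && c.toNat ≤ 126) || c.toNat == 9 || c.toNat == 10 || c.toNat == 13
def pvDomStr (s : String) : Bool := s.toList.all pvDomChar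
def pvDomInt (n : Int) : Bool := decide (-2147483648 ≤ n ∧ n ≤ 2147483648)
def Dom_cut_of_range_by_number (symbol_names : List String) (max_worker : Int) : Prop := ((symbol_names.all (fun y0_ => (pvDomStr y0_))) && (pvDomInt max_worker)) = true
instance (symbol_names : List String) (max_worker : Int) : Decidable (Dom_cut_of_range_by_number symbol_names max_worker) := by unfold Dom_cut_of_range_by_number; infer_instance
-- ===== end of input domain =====

-- B replaces A's element-by-element scan (testing idx % max_worker each step) by a closed-form
-- enumeration of the chunk boundaries from divmod(len, max_worker); Pre_ restricts to the natural
-- domain max_worker ≥ 1 (max_worker = 0 raises ZeroDivisionError in A; a negative worker count is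
-- outside the task's natural domain).


-- ===== PORT A =====
-- loop body of A, one step per idx (the enumerated value is never used by A's body)
def pvStepA (max_worker remainder divider : Int) (st : Int × List (Int × Int)) (idx : Int) : Int × List (Int × Int) :=
  if PySem.Int.mod idx max_worker = 0 then
    -- start_index = count * max_worker; end_index = idx; append; count += 1
    if st.1 + 1 = remainder then
      -- the tail range (count * max_worker, count * max_worker + divider) is appended too
      (st.1 + 1, st.2 ++ [(st.1 * max_worker, idx)]
        ++ [((st.1 + 1) * max_worker, (st.1 + 1) * max_worker + divider)])
    else
      (st.1 + 1, st.2 ++ [(st.1 * max_worker, idx)])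
  else
    st

def cut_of_range_by_number (symbol_names : List String) (max_worker : Int) : List (Int × Int) :=
  let remainder := PySem.Int.floordiv (symbol_names.length : Int) max_worker
  let divider := PySem.Int.mod (symbol_names.length : Int) max_worker
  ((PySem.List.pyRange 1 ((symbol_names.length : Int) + 1) 1).foldl
      (pvStepA max_worker remainder divider) (0, [])).2

-- ===== PORT B =====
def cut_of_range_by_number_alt (symbol_names : List String) (max_worker : Int) : List (Int × Int) :=
  match PySem.Int.divmod? (symbol_names.length : Int) max_worker with
  | none => []   -- unreachable under Pre_ (divmod? = none only for max_worker = 0)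
  | some (full, tail) =>
    let index_range := (PySem.List.pyRange 0 full 1).map
        (fun i => (i * max_worker, (i + 1) * max_worker))
    if 0 < full then
      index_range ++ [(full * max_worker, full * max_worker + tail)]
    else
      index_range

-- ===== PRECONDITION & SPEC =====
-- Pre_ keeps the natural domain max_worker >= 1: max_worker = 0 makes A raise ZeroDivisionError,
-- and a negative worker count is outside the task's natural domain (A returns ranges with
-- negative start indices there, which B does not mirror).
def Pre_cut_of_range_by_number (symbol_names : List String) (max_worker : Int) : Prop :=
  1 <= max_worker
instance (symbol_names : List String) (max_worker : Int) : Decidable (Pre_cut_of_range_by_number symbol_names max_worker) := by unfold Pre_cut_of_range_by_number; infer_instance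

def pvWitness_cut_of_range_by_number : List String × Int := (["a", "b", "c", "d", "e"], 2)

def Spec_cut_of_range_by_number (symbol_names : List String) (max_worker : Int) (out : List (Int × Int)) : Prop := out = cut_of_range_by_number_alt symbol_names max_worker
instance (symbol_names : List String) (max_worker : Int) (out : List (Int × Int)) : Decidable (Spec_cut_of_range_by_number symbol_names max_worker out) := by unfold Spec_cut_of_range_by_number; infer_instance

-- ===== CLAIM (what is proved, stated in full; the proofs are below) =====
def Claim_equal_cut_of_range_by_number : Prop := ∀ (symbol_names : List String) (max_worker : Int), Dom_cut_of_range_by_number symbol_names max_worker → Pre_cut_of_range_by_number symbol_names max_worker → Spec_cut_of_range_by_number symbol_names max_worker (cut_of_range_by_number symbol_names max_worker)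

-- ===== LEMMAS AND PROOFS =====

-- division-by-a-positive-divisor arithmetic for the loop invariant
lemma pv_ediv_succ_of_dvd (mw k : Int) (hmw : 0 < mw) (h : mw ∣ (k + 1)) :
    (k + 1) / mw = k / mw + 1 := by
  obtain ⟨m, hm⟩ := h
  have e1 : mw * m = (m - 1) * mw + mw := by ring
  have hk : k = (mw - 1) + (m - 1) * mw := by omega
  have h1 : k / mw = m - 1 := by
    rw [hk, Int.add_mul_ediv_right _ _ (by omega : mw ≠ 0),
        Int.ediv_eq_zero_of_lt (by omega) (by omega)]
    ring
  have h2 : (k + 1) / mw = m := by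
    have e0 : m * mw = mw * m := by ring
    have e2 : k + 1 = 0 + m * mw := by omega
    rw [e2, Int.add_mul_ediv_right _ _ (by omega : mw ≠ 0), Int.zero_ediv]
    ring
  omega

lemma pv_ediv_succ_of_not_dvd (mw k : Int) (hmw : 0 < mw) (h : ¬ mw ∣ (k + 1)) :
    (k + 1) / mw = k / mw ∧ (k + 1) % mw ≠ 0 := by
  have he0 : 0 ≤ k % mw := Int.emod_nonneg k (by omega)
  have he1 : k % mw < mw := Int.emod_lt_of_pos k hmw
  have hk : k = k % mw + (k / mw) * mw := by
    have h0 := Int.mul_ediv_add_emod k mw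
    have e1 : mw * (k / mw) = (k / mw) * mw := by ring
    omega
  have hne : k % mw + 1 ≠ mw := by
    intro hEq
    refine h ⟨k / mw + 1, ?_⟩
    have e2 : mw * (k / mw + 1) = (k / mw) * mw + mw := by ring
    omega
  have hsum : k + 1 = (k % mw + 1) + (k / mw) * mw := by omega
  constructor
  · rw [hsum, Int.add_mul_ediv_right _ _ (by omega : mw ≠ 0),
        Int.ediv_eq_zero_of_lt (by omega) (by omega)]
    omega
  · rw [hsum, Int.add_mul_emod_self_right,
        Int.emod_eq_of_lt (by omega) (by omega)]
    omega

-- the loop invariant: after processing idx = 1..k, count = k/mw and the list holds the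
-- first k/mw full chunks, plus the tail pair iff count has already reached N/mw (and is >= 1)
lemma pv_loopA_inv (mw N : Int) (hmw : 0 < mw) (k : Nat) (hk : (k : Int) ≤ N) :
    (PySem.List.pyRange 1 ((k : Int) + 1) 1).foldl
        (pvStepA mw (PySem.Int.floordiv N mw) (PySem.Int.mod N mw)) (0, []) =
      ((k : Int) / mw,
        ((PySem.List.pyRange 0 ((k : Int) / mw) 1).map (fun i => (i * mw, (i + 1) * mw))) ++
          (if (k : Int) / mw = N / mw ∧ 1 ≤ (k : Int) / mw
            then [((N / mw) * mw, (N / mw) * mw + N % mw)] else [])) := by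
  induction k with
  | zero =>
    simp [PySem.List.pyRange_one_eq_nil (le_refl (1:Int)),
          PySem.List.pyRange_one_eq_nil (le_refl (0:Int))]
  | succ k ih =>
    push_cast at hk
    have hk' : (k : Int) ≤ N := by omega
    have hstep : PySem.List.pyRange 1 ((k : Int) + 1) 1 ++ [((k : Int) + 1)]
        = PySem.List.pyRange 1 (((k + 1 : Nat) : Int) + 1) 1 := by
      push_cast
      rw [← PySem.List.pyRange_one_succ_right (by omega : (1:Int) ≤ (k : Int) + 1)]
    rw [← hstep, List.foldl_append, ih hk', List.foldl_cons, List.foldl_nil]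
    have hmod : PySem.Int.mod ((k : Int) + 1) mw = ((k : Int) + 1) % mw :=
      PySem.Int.mod_eq_emod_of_pos hmw
    have hfd : PySem.Int.floordiv N mw = N / mw := PySem.Int.floordiv_eq_ediv_of_pos hmw
    have hmd : PySem.Int.mod N mw = N % mw := PySem.Int.mod_eq_emod_of_pos hmw
    have hc0 : (0:Int) ≤ (k : Int) / mw := Int.ediv_nonneg (by positivity) (by omega)
    by_cases hdvd : mw ∣ ((k : Int) + 1)
    · -- a fire: idx = k+1 is a multiple of mw
      have hq : ((k : Int) + 1) / mw = (k : Int) / mw + 1 := pv_ediv_succ_of_dvd mw k hmw hdvd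
      have hmod0 : PySem.Int.mod ((k : Int) + 1) mw = 0 := by
        rw [hmod]; exact Int.emod_eq_zero_of_dvd hdvd
      have hmono : ((k : Int) + 1) / mw ≤ N / mw := Int.ediv_le_ediv hmw (by omega)
      have hend : ((k : Int) / mw + 1) * mw = (k : Int) + 1 := by
        obtain ⟨m, hm⟩ := hdvd
        have hm' : ((k : Int) + 1) / mw = m := by
          rw [hm, Int.mul_ediv_cancel_left _ (by omega : mw ≠ 0)]
        have hm2 : m = (k : Int) / mw + 1 := by omega
        rw [← hm2]
        have e : m * mw = mw * m := by ring
        omega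
      unfold pvStepA
      rw [hfd, hmd, if_pos hmod0]
      dsimp only
      have hnotail : ¬ ((k : Int) / mw = N / mw ∧ 1 ≤ (k : Int) / mw) := by
        rintro ⟨h1, _⟩; omega
      rw [if_neg hnotail]
      push_cast
      rw [hq]
      have hchunk1 : (PySem.List.pyRange 0 ((k : Int) / mw + 1) 1).map
            (fun i => (i * mw, (i + 1) * mw))
          = (PySem.List.pyRange 0 ((k : Int) / mw) 1).map (fun i => (i * mw, (i + 1) * mw))
            ++ [((k : Int) / mw * mw, ((k : Int) / mw + 1) * mw)] := by
        rw [PySem.List.pyRange_one_succ_right hc0, List.map_append]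
        rfl
      by_cases htl : (k : Int) / mw + 1 = N / mw
      · rw [if_pos htl, if_pos ⟨htl, by omega⟩, hchunk1, ← htl]
        simp [List.append_assoc, hend]
      · rw [if_neg htl, if_neg (by rintro ⟨h1, _⟩; exact htl h1), hchunk1]
        simp [hend]
    · -- no fire: idx = k+1 is not a multiple of mw
      obtain ⟨hq, hm0⟩ := pv_ediv_succ_of_not_dvd mw k hmw hdvd
      have hmodne : ¬ PySem.Int.mod ((k : Int) + 1) mw = 0 := by rw [hmod]; exact hm0
      unfold pvStepA
      rw [if_neg hmodne]
      push_cast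
      rw [hq]

theorem cut_of_range_by_number_eq_alt (symbol_names : List String) (max_worker : Int)
    (hpre : 1 ≤ max_worker) :
    cut_of_range_by_number symbol_names max_worker
      = cut_of_range_by_number_alt symbol_names max_worker := by
  have hmw : 0 < max_worker := by omega
  show ((PySem.List.pyRange 1 ((symbol_names.length : Int) + 1) 1).foldl
      (pvStepA max_worker (PySem.Int.floordiv (symbol_names.length : Int) max_worker)
        (PySem.Int.mod (symbol_names.length : Int) max_worker)) (0, [])).2 = _
  unfold cut_of_range_by_number_alt
  have hinv := pv_loopA_inv max_worker (symbol_names.length : Int) hmw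
    symbol_names.length (le_refl _)
  rw [hinv]
  have hdm : PySem.Int.divmod? (symbol_names.length : Int) max_worker
      = some ((symbol_names.length : Int) / max_worker,
              (symbol_names.length : Int) % max_worker) := by
    simp only [PySem.Int.divmod?]
    rw [if_neg (by omega : ¬ max_worker = 0)]
    simp [Int.fdiv_eq_ediv, Int.fmod_eq_emod, (by omega : (0:Int) ≤ max_worker)]
  rw [hdm]
  dsimp only
  by_cases hfull : 0 < (symbol_names.length : Int) / max_worker
  · rw [if_pos ⟨rfl, by omega⟩, if_pos hfull]
  · rw [if_neg (by rintro ⟨_, h⟩; omega), if_neg hfull]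
    simp

-- ===== VERDICT (by name: the statement is the Claim_ definition above) =====
theorem cut_of_range_by_number_spec : Claim_equal_cut_of_range_by_number := by
  intro symbol_names max_worker _ hpre
  unfold Spec_cut_of_range_by_number
  exact cut_of_range_by_number_eq_alt symbol_names max_worker hpre
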